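-- pv_equiv track=rewrite | github.com/ashutosh164/DSA | deloitte dsa/practice2.py | non_repeating_ch
-- ===== SOURCE A (Python) =====
-- def non_repeating_ch(txt):
--     txt = txt.replace(' ', '')
--     data = {}
--     for ch in txt:
--         data[ch] = data.get(ch, 0) + 1
--     ch_data = []
--     for ch,count in data.items():
--         if count == 1:
--             ch_data.append(ch)
--     return ch_data
-- ===== SOURCE B (Python) =====
-- def non_repeating_ch(txt):
--     txt = txt.replace(' ', '')
--     seen = set()
--     duplicated = set()
--     for ch in txt:
--         if ch in seen:
--             duplicated.add(ch)
--         else: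
--             seen.add(ch)
--     return [ch for ch in txt if ch not in duplicated]
-- ===== Notes on version B (the rewrite author's own statement) =====
-- stated objective: simpler
-- what changed: Replaces the count dictionary and the items() pass by two membership sets built in one pass, with the result produced by re-scanning the stripped string for characters not in the duplicated set (first-occurrence order falls out of the string order).
import Mathlib
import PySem

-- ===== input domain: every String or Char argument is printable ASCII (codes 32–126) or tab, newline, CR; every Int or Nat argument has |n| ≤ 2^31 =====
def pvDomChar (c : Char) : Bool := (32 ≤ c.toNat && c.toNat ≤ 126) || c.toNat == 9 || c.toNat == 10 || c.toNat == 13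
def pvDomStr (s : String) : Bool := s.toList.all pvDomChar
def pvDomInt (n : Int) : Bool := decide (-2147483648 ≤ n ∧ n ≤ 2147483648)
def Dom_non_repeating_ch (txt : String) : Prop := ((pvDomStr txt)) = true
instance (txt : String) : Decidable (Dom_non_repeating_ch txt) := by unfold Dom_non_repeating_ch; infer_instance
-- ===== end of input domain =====

-- B replaces A's count dictionary + items() pass by two membership sets and a rescan of the
-- stripped string; same result, a simpler decomposition (no speed claim).


-- ===== PORT A =====
-- txt = txt.replace(' ', ''); count dict; then collect keys whose count is 1, in dict order.
def non_repeating_ch (txt : String) : List String :=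
  let cs := (PySem.Str.replace txt " " "").toList
  let data := cs.foldl (fun d ch => d.insert ch (d.getD ch 0 + 1)) (PySem.Dict.empty : PySem.Dict Char Int)
  data.items.foldl (fun acc p => if p.2 == 1 then acc ++ [String.mk [p.1]] else acc)
    ([] : List String)

-- ===== PORT B =====
-- one pass building (seen, duplicated) sets
def pvScan (cs : List Char) : PySem.Set Char × PySem.Set Char :=
  cs.foldl (fun sd ch =>
      if PySem.Set.contains sd.1 ch then (sd.1, PySem.Set.add sd.2 ch)
      else (PySem.Set.add sd.1 ch, sd.2))
    (PySem.Set.empty, PySem.Set.empty)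

def non_repeating_ch_alt (txt : String) : List String :=
  let cs := (PySem.Str.replace txt " " "").toList
  let dup := (pvScan cs).2
  (cs.filter (fun ch => !(PySem.Set.contains dup ch))).map (fun ch => String.mk [ch])

-- ===== PRECONDITION & SPEC =====
def Spec_non_repeating_ch (txt : String) (out : List String) : Prop := out = non_repeating_ch_alt txt
instance (txt : String) (out : List String) : Decidable (Spec_non_repeating_ch txt out) := by unfold Spec_non_repeating_ch; infer_instance

-- ===== CLAIM (what is proved, stated in full; the proofs are below) =====
def Claim_equal_non_repeating_ch : Prop := ∀ (txt : String), Dom_non_repeating_ch txt → Spec_non_repeating_ch txt (non_repeating_ch txt)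

-- ===== LEMMAS AND PROOFS =====

-- one fold step from the right
lemma pvScan_append (l : List Char) (x : Char) :
    pvScan (l ++ [x]) =
      (if PySem.Set.contains (pvScan l).1 x then ((pvScan l).1, PySem.Set.add (pvScan l).2 x)
       else (PySem.Set.add (pvScan l).1 x, (pvScan l).2)) := by
  simp [pvScan, List.foldl_append]

-- invariant of B's first pass: seen = members, duplicated = chars occurring at least twice
lemma pvScan_mem (cs : List Char) :
    (∀ c, c ∈ (pvScan cs).1 ↔ c ∈ cs) ∧ (∀ c, c ∈ (pvScan cs).2 ↔ 2 ≤ cs.count c) := by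
  induction cs using List.reverseRecOn with
  | nil => simp [pvScan, PySem.Set.empty]
  | append_singleton l x ih =>
    rw [pvScan_append]
    by_cases hx : x ∈ l
    · have hc : PySem.Set.contains (pvScan l).1 x = true :=
        (PySem.Set.contains_iff _ _).mpr ((ih.1 x).mpr hx)
      have hcount := List.count_pos_iff.mpr hx
      simp only [hc, if_true]
      refine ⟨fun c => ?_, fun c => ?_⟩
      · rw [ih.1 c]
        simp only [List.mem_append, List.mem_singleton]
        constructor
        · exact Or.inl
        · rintro (h | rfl)
          · exact h
          · exact hx
      · rw [PySem.Set.mem_add, ih.2 c]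
        simp only [List.count_append, List.count_singleton]
        constructor
        · rintro (h | rfl)
          · omega
          · simp only [beq_self_eq_true, if_true]; omega
        · intro h
          by_cases hcx : c = x
          · exact Or.inr hcx
          · left
            rw [if_neg (fun h' => hcx (eq_of_beq h').symm)] at h
            omega
    · have hc : PySem.Set.contains (pvScan l).1 x = false := by
        rw [← Bool.not_eq_true, PySem.Set.contains_iff]
        exact fun hmem => hx ((ih.1 x).mp hmem)
      have hcount : l.count x = 0 := List.count_eq_zero.mpr hx
      simp only [hc, Bool.false_eq_true, if_false]
      refine ⟨fun c => ?_, fun c => ?_⟩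
      · rw [PySem.Set.mem_add, ih.1 c]
        simp [List.mem_append]
      · rw [ih.2 c]
        simp only [List.count_append, List.count_singleton]
        by_cases hcx : c = x
        · subst hcx
          simp only [beq_self_eq_true, if_true]
          omega
        · rw [if_neg (fun h' => hcx (eq_of_beq h').symm)]
          omega

-- chars that pass a uniqueness-implying test are kept once each, so filtering the
-- deduplicated list and filtering the list itself agree
lemma pvFilter_unique (l : List Char) (q : Char → Bool)
    (h : ∀ c, q c = true → l.count c ≤ 1) :
    (PySem.Set.ofList l).filter q = l.filter q := by
  induction l with
  | nil => rfl
  | cons x xs ih =>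
    have hxs : ∀ c, q c = true → xs.count c ≤ 1 := by
      intro c hq
      have := h c hq
      rw [List.count_cons] at this
      split at this <;> omega
    rw [PySem.Set.ofList_cons]
    by_cases hq : q x = true
    · have hx0 : xs.count x = 0 := by
        have h1 := h x hq
        rw [List.count_cons] at h1
        split at h1
        · omega
        · simp_all
      have hxnot : x ∉ xs := by
        intro hmem
        have := List.count_pos_iff.mpr hmem
        omega
      have hdis : PySem.Set.discard (PySem.Set.ofList xs) x = PySem.Set.ofList xs := by
        apply List.filter_eq_self.mpr
        intro y hy
        have hymem : y ∈ xs := (PySem.Set.mem_ofList xs y).mp hy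
        have hyx : y ≠ x := fun hyx => hxnot (hyx ▸ hymem)
        simp [hyx]
      rw [List.filter_cons_of_pos hq, hdis, ih hxs, List.filter_cons_of_pos hq]
    · rw [List.filter_cons_of_neg hq, List.filter_cons_of_neg hq, ← ih hxs]
      simp only [PySem.Set.discard, List.filter_filter]
      apply List.filter_congr
      intro y _
      by_cases hqy : q y = true
      · have hyx : (y == x) = false := by
          rw [beq_eq_false_iff_ne]
          intro hyx
          exact hq (hyx ▸ hqy)
        simp [hqy, hyx]
      · simp [Bool.eq_false_iff.mpr hqy]

-- the whole computation, on the stripped character list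
lemma pvMain (cs : List Char) :
    (cs.foldl (fun d ch => d.insert ch (d.getD ch 0 + 1))
        (PySem.Dict.empty : PySem.Dict Char Int)).items.foldl
        (fun acc p => if p.2 == 1 then acc ++ [String.mk [p.1]] else acc) ([] : List String)
    = (cs.filter (fun ch => !(PySem.Set.contains (pvScan cs).2 ch))).map
        (fun ch => String.mk [ch]) := by
  show (PySem.Dict.counter cs).items.foldl
        (fun acc p => if p.2 == 1 then acc ++ [String.mk [p.1]] else acc) ([] : List String)
    = (cs.filter (fun ch => !(PySem.Set.contains (pvScan cs).2 ch))).map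
        (fun ch => String.mk [ch])
  rw [PySem.List.foldl_append_if, PySem.Dict.items_counter, List.nil_append,
      List.filter_map, List.map_map]
  have h1 : (PySem.Set.ofList cs).filter
        ((fun p : Char × Int => p.2 == 1) ∘ (fun k => (k, (cs.count k : Int))))
      = (PySem.Set.ofList cs).filter (fun k => cs.count k == 1) := by
    apply List.filter_congr
    intro c _
    rcases eq_or_ne (cs.count c) 1 with h | h <;>
      simp [Function.comp, h, Nat.cast_eq_one]
  have h2 : cs.filter (fun ch => !(PySem.Set.contains (pvScan cs).2 ch))
      = cs.filter (fun k => cs.count k == 1) := by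
    apply List.filter_congr
    intro c hc
    have hdup := (pvScan_mem cs).2 c
    have hpos : 0 < cs.count c := List.count_pos_iff.mpr hc
    by_cases hd : c ∈ (pvScan cs).2
    · have hct : PySem.Set.contains (pvScan cs).2 c = true := (PySem.Set.contains_iff _ _).mpr hd
      have h2le : 2 ≤ cs.count c := hdup.mp hd
      rw [hct, Bool.not_true]
      have hne : (cs.count c == 1) = false := by
        rw [beq_eq_false_iff_ne]; omega
      rw [hne]
    · have hct : PySem.Set.contains (pvScan cs).2 c = false := by
        rw [← Bool.not_eq_true, PySem.Set.contains_iff]; exact hd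
      have hlt : ¬ 2 ≤ cs.count c := fun h => hd (hdup.mpr h)
      rw [hct, Bool.not_false]
      have heq : (cs.count c == 1) = true := by
        rw [beq_iff_eq]; omega
      rw [heq]
  rw [h1, h2, pvFilter_unique cs _ (fun c hq => by
    rw [beq_iff_eq] at hq
    omega)]
  exact List.map_congr_left (fun c _ => rfl)

-- ===== VERDICT (by name: the statement is the Claim_ definition above) =====
theorem non_repeating_ch_spec : Claim_equal_non_repeating_ch := by
  intro txt _
  unfold Spec_non_repeating_ch non_repeating_ch non_repeating_ch_alt
  exact pvMain ((PySem.Str.replace txt " " "").toList)
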